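-- pv_equiv track=rewrite | github.com/MrBrantCode/unitest_baseline | mut_generate/mist_train_cf/cf_9392/solution.py | reverse_alphabetical_string
-- ===== SOURCE A (Python) =====
-- def reverse_alphabetical_string(s):
--     """
--     This function takes a string as input and returns the string sorted in reverse alphabetical order,
--     ignoring any spaces and case sensitivity. The function handles strings containing lowercase and
--     uppercase letters, and non-alphabetic characters maintain their original positions.
--
--     Parameters:
--     s (str): The input string.
--
--     Returns:
--     str: The string sorted in reverse alphabetical order.
--     """
--     # Split the string into alphabetic and non-alphabetic characters
--     alphabetic_chars = [char for char in s if char.isalpha()]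
--     non_alphabetic_chars = [char for char in s if not char.isalpha()]
--
--     # Sort the alphabetic characters in reverse alphabetical order
--     alphabetic_chars.sort(key=str.lower, reverse=True)
--
--     # Initialize an empty list to store the result
--     result = []
--
--     # Initialize two pointers, one for alphabetic characters and one for non-alphabetic characters
--     alpha_index = 0
--     non_alpha_index = 0
--
--     # Iterate over the original string to maintain the original positions of non-alphabetic characters
--     for char in s:
--         if char.isalpha():
--             result.append(alphabetic_chars[alpha_index])
--             alpha_index += 1
--         else:
--             result.append(non_alphabetic_chars[non_alpha_index])
--             non_alpha_index += 1
--
--     # Convert the result list back to a string and return it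
--     return ''.join(result)
-- ===== SOURCE B (Python) =====
-- def reverse_alphabetical_string(s):
--     # Bucket-style key sweep: no comparison sort. Collect the letters key by key,
--     # from the highest key down to the lowest (case-insensitive), keeping original order within a key,
--     # then put them back into the letter positions; non-letters stay where they are.
--     letters = []
--     for k in range(25, -1, -1):
--         target = chr(ord('a') + k)
--         for ch in s:
--             if ch.isalpha() and ch.lower() == target:
--                 letters.append(ch)
--     it = iter(letters)
--     return ''.join(next(it) if ch.isalpha() else ch for ch in s)
-- ===== Notes on version B (the rewrite author's own statement) =====
-- stated objective: alternative
-- what changed: Replaces the comparison sort (sort with key=str.lower, reverse=True) and the separate non-alphabetic list by a bucket-style sweep over the 26 lowercase keys from the highest key to the lowest, collecting letters per key in original order and streaming them back into the letter positions.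
import Mathlib
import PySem

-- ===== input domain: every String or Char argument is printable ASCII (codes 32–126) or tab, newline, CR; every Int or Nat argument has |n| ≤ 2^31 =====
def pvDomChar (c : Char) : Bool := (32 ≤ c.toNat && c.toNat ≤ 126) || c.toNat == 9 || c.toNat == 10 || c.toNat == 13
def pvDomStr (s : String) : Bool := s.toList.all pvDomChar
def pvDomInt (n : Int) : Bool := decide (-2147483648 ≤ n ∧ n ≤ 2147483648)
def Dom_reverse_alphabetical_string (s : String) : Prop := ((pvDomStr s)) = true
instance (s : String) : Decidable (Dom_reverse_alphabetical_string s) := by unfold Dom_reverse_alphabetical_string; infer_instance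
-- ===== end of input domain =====

-- B replaces A's comparison sort (sort key=str.lower, reverse=True) and A's separate
-- non-alphabetic list by a bucket-style sweep over the 26 lowercase keys from the highest key down
-- to the lowest (alternative algorithm; not measured faster).


-- shared char primitives:
-- ch.isalpha() — exact on the ASCII chars Dom admits
def pvIsAl (c : Char) : Bool := ('a' ≤ c && c ≤ 'z') || ('A' ≤ c && c ≤ 'Z')
-- str.lower() on a one-char ASCII string (single-char string comparison = char-code comparison)
def pvLower (c : Char) : Char := if 'A' ≤ c && c ≤ 'Z' then Char.ofNat (c.toNat + 32) else c

-- ===== PORT A =====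
-- loop state (result, alpha_index, non_alpha_index); list.getD's default char is
-- never used: both indices stay in range (one entry per character of each kind).
def reverse_alphabetical_string (s : String) : String :=
  let alphabetic_chars := s.toList.filter (fun ch => pvIsAl ch)
  let non_alphabetic_chars := s.toList.filter (fun ch => !pvIsAl ch)
  let sortedAlpha := PySem.List.sorted alphabetic_chars (fun ch => pvLower ch) true
  let res := s.toList.foldl
    (fun (st : List Char × Nat × Nat) ch =>
      if pvIsAl ch then (st.1 ++ [sortedAlpha.getD st.2.1 'a'], st.2.1 + 1, st.2.2)
      else (st.1 ++ [non_alphabetic_chars.getD st.2.2 'a'], st.2.1, st.2.2 + 1))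
    ([], 0, 0)
  String.ofList res.1

-- ===== PORT B =====
-- ''.join(next(it) if ch.isalpha() else ch for ch in s): the iterator over `letters`
-- is consumed head-first; the [] branch (StopIteration) is unreachable, since
-- `letters` holds exactly one element per letter of s.
def pvBNext : List Char → List Char → List Char
  | [], _ => []
  | c :: rest, ls =>
    if pvIsAl c then
      match ls with
      | l :: t => l :: pvBNext rest t
      | [] => []
    else c :: pvBNext rest ls

def reverse_alphabetical_string_alt (s : String) : String :=
  let cs := s.toList
  let letters := (PySem.List.pyRange 25 (-1) (-1)).foldl
    (fun acc k =>
      let target := Char.ofNat (97 + k).toNat   -- chr(ord('a') + k), k ∈ [0, 25]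
      cs.foldl (fun acc2 ch => if pvIsAl ch && pvLower ch == target then acc2 ++ [ch] else acc2) acc)
    []
  String.ofList (pvBNext cs letters)

-- ===== PRECONDITION & SPEC =====
def Spec_reverse_alphabetical_string (s : String) (out : String) : Prop := out = reverse_alphabetical_string_alt s
instance (s : String) (out : String) : Decidable (Spec_reverse_alphabetical_string s out) := by unfold Spec_reverse_alphabetical_string; infer_instance

-- ===== CLAIM (what is proved, stated in full; the proofs are below) =====
def Claim_equal_reverse_alphabetical_string : Prop := ∀ (s : String), Dom_reverse_alphabetical_string s → Spec_reverse_alphabetical_string s (reverse_alphabetical_string s)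

-- ===== LEMMAS AND PROOFS =====

-- the 26 lowercase key chars, highest first (= the order B sweeps them)
def pvKeys : List Char :=
  ['z','y','x','w','v','u','t','s','r','q','p','o','n','m','l','k','j','i','h','g','f','e','d','c','b','a']

lemma pvKeys_eq_map :
    (PySem.List.pyRange 25 (-1) (-1)).map (fun k => Char.ofNat (97 + k).toNat) = pvKeys := by decide

lemma pvKeys_desc : pvKeys.Pairwise (fun a b => b < a) := by decide

lemma pvLower_mem_keys (c : Char) (h : pvIsAl c = true) : pvLower c ∈ pvKeys := by
  have hb : 97 ≤ (pvLower c).toNat ∧ (pvLower c).toNat ≤ 122 := by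
    simp only [pvIsAl, Bool.or_eq_true, Bool.and_eq_true, decide_eq_true_eq] at h
    by_cases hu : ('A' ≤ c && c ≤ 'Z') = true
    · simp only [pvLower, hu, if_true]
      simp only [Bool.and_eq_true, decide_eq_true_eq] at hu
      have h1 : 65 ≤ c.toNat := Nat.succ_le_of_lt hu.1
      have h2 : c.toNat ≤ 90 := hu.2
      have : (Char.ofNat (c.toNat + 32)).toNat = c.toNat + 32 := by
        simp [Char.toNat_ofNat]; omega
      omega
    · simp only [pvLower, hu]
      simp only [Bool.and_eq_true, decide_eq_true_eq, not_and] at hu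
      rcases h with ⟨h1, h2⟩ | ⟨h1, h2⟩
      · exact ⟨Nat.succ_le_of_lt h1, h2⟩
      · exact absurd h2 (by simpa using hu h1)
  obtain ⟨h1, h2⟩ := hb
  have hd : pvLower c = Char.ofNat (pvLower c).toNat := (Char.ofNat_toNat _).symm
  rw [hd]
  set n := (pvLower c).toNat with hn
  interval_cases n <;> decide

-- insertBy leaves alone a prefix the new element must not precede
lemma pv_insertBy_append_left (before : Char → Char → Bool) (x : Char) (l1 l2 : List Char)
    (h : ∀ y ∈ l1, before x y = false) :
    PySem.List.insertBy before x (l1 ++ l2) = l1 ++ PySem.List.insertBy before x l2 := by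
  induction l1 with
  | nil => simp
  | cons a t ih =>
    have ha : before x a = false := h a (by simp)
    simp [PySem.List.insertBy, ha, ih (fun y hy => h y (by simp [hy]))]

-- insertBy puts the new element in front of a list of strictly smaller keys
lemma pv_insertBy_front (x : Char) (l : List Char)
    (h : ∀ y ∈ l, pvLower y < pvLower x) :
    PySem.List.insertBy (fun a b => decide (pvLower b < pvLower a)) x l = x :: l := by
  cases l with
  | nil => simp [PySem.List.insertBy]
  | cons a t => simp [PySem.List.insertBy, h a (by simp)]

-- stable reverse-insertion into the bucket decomposition = append to the own bucket
lemma pv_flat_insert (x : Char) (K : List Char) (F : Char → List Char)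
    (hK : K.Pairwise (fun a b => b < a))
    (hF : ∀ k ∈ K, ∀ y ∈ F k, pvLower y = k)
    (hx : pvLower x ∈ K) :
    PySem.List.insertBy (fun a b => decide (pvLower b < pvLower a)) x (K.flatMap F)
      = K.flatMap (fun k => F k ++ if pvLower x == k then [x] else []) := by
  induction K with
  | nil => simp at hx
  | cons k K' ih =>
    rw [List.pairwise_cons] at hK
    obtain ⟨hklt, hK'⟩ := hK
    by_cases hxk : pvLower x = k
    · have hskip : ∀ y ∈ F k, (decide (pvLower y < pvLower x)) = false := by
        intro y hy
        have : pvLower y = k := hF k (by simp) y hy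
        simp [this, hxk]
      rw [List.flatMap_cons, pv_insertBy_append_left _ _ _ _ hskip]
      have hrest : ∀ y ∈ K'.flatMap F, pvLower y < pvLower x := by
        intro y hy
        obtain ⟨k', hk', hy'⟩ := List.mem_flatMap.mp hy
        have : pvLower y = k' := hF k' (by simp [hk']) y hy'
        rw [this, hxk]; exact hklt k' hk'
      rw [pv_insertBy_front x _ hrest]
      have hnotk : ∀ k' ∈ K', (F k' ++ if (pvLower x == k') = true then [x] else []) = F k' := by
        intro k' hk'
        have hlt : k' < k := hklt k' hk'
        have hne : ¬(pvLower x == k') = true := by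
          intro hbeq
          have he : pvLower x = k' := by simpa using hbeq
          rw [hxk] at he
          rw [← he] at hlt
          exact lt_irrefl _ hlt
        simp [hne]
      rw [List.flatMap_cons, List.flatMap_congr hnotk]
      simp [hxk]
    · have hxK' : pvLower x ∈ K' := by
        rcases List.mem_cons.mp hx with h | h
        · exact absurd h hxk
        · exact h
      have hxlt : pvLower x < k := hklt _ hxK'
      have hskip : ∀ y ∈ F k, (decide (pvLower y < pvLower x)) = false := by
        intro y hy
        have : pvLower y = k := hF k (by simp) y hy
        simp [this]; exact le_of_lt hxlt
      rw [List.flatMap_cons, pv_insertBy_append_left _ _ _ _ hskip,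
        ih hK' (fun k' hk' => hF k' (by simp [hk'])) hxK']
      simp [List.flatMap_cons, hxk]

-- A's stable reverse sort is B's bucket concatenation
lemma pv_sorted_eq_flat (xs : List Char) (K : List Char)
    (hK : K.Pairwise (fun a b => b < a))
    (hall : ∀ c ∈ xs, pvLower c ∈ K) :
    PySem.List.sorted xs (fun c => pvLower c) true
      = K.flatMap (fun k => xs.filter (fun c => pvLower c == k)) := by
  rw [PySem.List.sorted_rev_eq_foldl_insertBy]
  induction xs using List.reverseRecOn with
  | nil => simp
  | append_singleton ys x ih =>
    have hys : ∀ c ∈ ys, pvLower c ∈ K := fun c hc => hall c (by simp [hc])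
    rw [List.foldl_append, List.foldl_cons, List.foldl_nil, ih hys]
    rw [pv_flat_insert x K (fun k => ys.filter (fun c => pvLower c == k)) hK
      (fun k _ y hy => by simpa using (List.mem_filter.mp hy).2)
      (hall x (by simp))]
    simp only [List.filter_append]
    exact List.flatMap_congr (fun k _ => by by_cases h : pvLower x = k <;> simp [h])

-- A's merge loop as a recursion on the remaining input (proof-only helper)
def pvMergeIdx (sortedAlpha nonal : List Char) : List Char → Nat → Nat → List Char
  | [], _, _ => []
  | c :: rest, ai, ni =>
    if pvIsAl c then sortedAlpha.getD ai 'a' :: pvMergeIdx sortedAlpha nonal rest (ai + 1) ni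
    else nonal.getD ni 'a' :: pvMergeIdx sortedAlpha nonal rest ai (ni + 1)

lemma pv_foldA_eq_mergeIdx (sa na : List Char) (cs : List Char) : ∀ (acc : List Char) (ai ni : Nat),
    (cs.foldl
      (fun (st : List Char × Nat × Nat) ch =>
        if pvIsAl ch then (st.1 ++ [sa.getD st.2.1 'a'], st.2.1 + 1, st.2.2)
        else (st.1 ++ [na.getD st.2.2 'a'], st.2.1, st.2.2 + 1))
      (acc, ai, ni)).1 = acc ++ pvMergeIdx sa na cs ai ni := by
  induction cs with
  | nil => simp [pvMergeIdx]
  | cons c rest ih =>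
    intro acc ai ni
    by_cases h : pvIsAl c = true <;>
      simp only [List.foldl_cons, h, Bool.false_eq_true, if_pos, ite_false, pvMergeIdx, ih] <;> simp

lemma pv_getD_of_drop (l : List Char) (i : Nat) (a : Char) (t : List Char)
    (h : l.drop i = a :: t) : l.getD i 'a' = a := by
  have h0 : l[i]? = (l.drop i)[0]? := by rw [List.getElem?_drop]; norm_num
  rw [List.getD_eq_getElem?_getD, h0, h]
  rfl

lemma pv_drop_succ (l : List Char) (i : Nat) (a : Char) (t : List Char)
    (h : l.drop i = a :: t) : l.drop (i + 1) = t := by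
  have : l.drop (i + 1) = (l.drop i).drop 1 := by rw [List.drop_drop]
  rw [this, h]
  rfl

-- A's index-based merge = B's head-first iterator merge
lemma pv_mergeIdx_eq_bnext (sa na : List Char) : ∀ (cs ls : List Char) (ai ni : Nat),
    sa.drop ai = ls →
    (cs.filter (fun c => pvIsAl c)).length ≤ ls.length →
    na.drop ni = cs.filter (fun c => !pvIsAl c) →
    pvMergeIdx sa na cs ai ni = pvBNext cs ls := by
  intro cs
  induction cs with
  | nil => intro ls ai ni _ _ _; simp [pvMergeIdx, pvBNext]
  | cons c rest ih =>
    intro ls ai ni hdrop hlen hna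
    by_cases h : pvIsAl c = true
    · have hfa : (c :: rest).filter (fun c => pvIsAl c) = c :: rest.filter (fun c => pvIsAl c) := by
        simp [h]
      rw [hfa] at hlen
      cases ls with
      | nil => simp at hlen
      | cons l t =>
        have hget : sa.getD ai 'a' = l := pv_getD_of_drop sa ai l t hdrop
        have hna' : na.drop ni = rest.filter (fun c => !pvIsAl c) := by
          rw [hna]; simp [h]
        simp only [pvMergeIdx, pvBNext, h, if_true, hget]
        rw [ih t (ai + 1) ni (pv_drop_succ sa ai l t hdrop) (by simpa using hlen) hna']
    · have hna0 : na.drop ni = c :: rest.filter (fun c => !pvIsAl c) := by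
        rw [hna]; simp [h]
      have hget : na.getD ni 'a' = c := pv_getD_of_drop na ni c _ hna0
      have hlen' : (rest.filter (fun c => pvIsAl c)).length ≤ ls.length := by
        have : (c :: rest).filter (fun c => pvIsAl c) = rest.filter (fun c => pvIsAl c) := by
          simp [h]
        rw [this] at hlen; exact hlen
      simp only [pvMergeIdx, pvBNext, h, Bool.false_eq_true, ite_false, hget]
      rw [ih ls ai (ni + 1) hdrop hlen' (pv_drop_succ na ni c _ hna0)]

-- B's letters list = the bucket concatenation over pvKeys
lemma pv_letters_eq_flat (cs : List Char) :
    (PySem.List.pyRange 25 (-1) (-1)).foldl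
      (fun acc k =>
        cs.foldl (fun acc2 ch =>
          if pvIsAl ch && pvLower ch == Char.ofNat (97 + k).toNat then acc2 ++ [ch] else acc2) acc)
      []
    = pvKeys.flatMap (fun t => (cs.filter (fun c => pvIsAl c)).filter (fun c => pvLower c == t)) := by
  have h1 : ∀ (acc : List Char) (k : Int), k ∈ PySem.List.pyRange 25 (-1) (-1) →
      (cs.foldl (fun acc2 ch =>
        if pvIsAl ch && pvLower ch == Char.ofNat (97 + k).toNat then acc2 ++ [ch] else acc2) acc)
      = acc ++ cs.filter (fun ch => pvIsAl ch && pvLower ch == Char.ofNat (97 + k).toNat) := by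
    intro acc k _
    exact PySem.List.foldl_append_if_eq_filter _ _ _
  rw [PySem.List.foldl_congr_mem (PySem.List.pyRange 25 (-1) (-1)) _
    (fun acc k => acc ++ cs.filter (fun ch => pvIsAl ch && pvLower ch == Char.ofNat (97 + k).toNat)) [] h1,
    PySem.List.foldl_append_eq_flatMap]
  rw [← pvKeys_eq_map, List.flatMap_map]
  simp only [List.nil_append]
  exact List.flatMap_congr (fun k _ => by
    rw [List.filter_filter]
    exact List.filter_congr (fun c _ => by by_cases h : pvIsAl c = true <;> simp [h]))

-- ===== VERDICT (by name: the statement is the Claim_ definition above) =====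
theorem reverse_alphabetical_string_spec : Claim_equal_reverse_alphabetical_string := by
  intro s _
  unfold Spec_reverse_alphabetical_string reverse_alphabetical_string reverse_alphabetical_string_alt
  simp only []
  set cs := s.toList with hcs
  set alf := cs.filter (fun ch => pvIsAl ch) with half
  set na := cs.filter (fun ch => !pvIsAl ch) with hna
  set sa := PySem.List.sorted alf (fun ch => pvLower ch) true with hsa
  rw [pv_foldA_eq_mergeIdx sa na cs [] 0 0, List.nil_append, pv_letters_eq_flat cs]
  have hflat : sa = pvKeys.flatMap (fun t => alf.filter (fun c => pvLower c == t)) := by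
    rw [hsa]
    exact pv_sorted_eq_flat alf pvKeys pvKeys_desc
      (fun c hc => pvLower_mem_keys c (by simpa using (List.mem_filter.mp hc).2))
  rw [← hflat]
  congr 1
  exact pv_mergeIdx_eq_bnext sa na cs sa 0 0 rfl
    (by rw [hsa, PySem.List.length_sorted]) (by simp [hna])
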